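-- pv_equiv track=rewrite | github.com/cruxible-ai/cruxible-core | demos/kev-triage/providers.py | _pick_latest_fixed_version
-- ===== SOURCE A (Python) =====
-- from typing import Any
--
-- def _pick_latest_fixed_version(
--     versions: list[dict[str, Any]],
-- ) -> str | None:
--     """Pick the highest fixed_version from a list of version ranges."""
--     fixed_versions = [
--         v["fixed_version"] for v in versions if v.get("fixed_version")
--     ]
--     if not fixed_versions:
--         return None
--     # Simple lexicographic max — good enough for semver-ish strings
--     return max(fixed_versions)
-- ===== SOURCE B (Python) =====
-- def _pick_latest_fixed_version(versions):
--     """Pick the highest fixed_version from a list of version ranges."""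
--     candidates = sorted(v.get("fixed_version") or "" for v in versions)
--     top = candidates[-1] if candidates else ""
--     return top or None
-- ===== Notes on version B (the rewrite author's own statement) =====
-- stated objective: alternative
-- what changed: Replaced the filter-then-max pipeline by sorting a candidate list padded with "" for missing/empty entries and taking its last element ('' maps back to None), so no filtering or max call remains.
import Mathlib
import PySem

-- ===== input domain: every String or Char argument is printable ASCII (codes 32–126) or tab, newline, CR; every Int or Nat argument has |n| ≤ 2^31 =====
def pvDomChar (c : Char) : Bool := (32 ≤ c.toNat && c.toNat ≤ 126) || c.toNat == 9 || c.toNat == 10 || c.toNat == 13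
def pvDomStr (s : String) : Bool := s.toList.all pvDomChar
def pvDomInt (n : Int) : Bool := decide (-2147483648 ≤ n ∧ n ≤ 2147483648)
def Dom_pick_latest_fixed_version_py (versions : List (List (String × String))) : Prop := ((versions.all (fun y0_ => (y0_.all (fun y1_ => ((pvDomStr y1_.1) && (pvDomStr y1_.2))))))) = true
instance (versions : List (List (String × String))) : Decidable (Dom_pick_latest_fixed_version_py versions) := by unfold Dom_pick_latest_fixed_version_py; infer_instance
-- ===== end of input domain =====

-- B replaces A's filter-then-max pipeline by sorting a ""-padded candidate list and taking its last element (alternative decomposition; same result).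

-- ===== PORT A =====
-- guard of A's list comprehension: 'if v.get("fixed_version")' (truthy = key present with non-empty string)
def pvAguard (v : List (String × String)) : Bool :=
  match (PySem.Dict.mk v).get? "fixed_version" with
  | some s => s ≠ ""
  | none => false

-- element of A's comprehension: v["fixed_version"]; the .getD "" default is never used
-- since the comprehension's guard guarantees the key is present
def pvAval (v : List (String × String)) : String :=
  ((PySem.Dict.mk v).get? "fixed_version").getD ""

def pick_latest_fixed_version_py (versions : List (List (String × String))) : Option String :=
  let fixed_versions := (versions.filter pvAguard).map pvAval
  if fixed_versions.isEmpty then none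
  else PySem.List.max? fixed_versions (fun x => x)

-- ===== PORT B =====
-- B's generator element: v.get("fixed_version") or "" (the only falsy string is "")
def pvBval (v : List (String × String)) : String :=
  ((PySem.Dict.mk v).get? "fixed_version").getD ""

def pick_latest_fixed_version_py_alt (versions : List (List (String × String))) : Option String :=
  let candidates := PySem.List.sorted (versions.map pvBval) (fun x => x) false
  let top := if candidates.isEmpty then "" else (PySem.List.pyGet? candidates (-1)).getD ""
  if top = "" then none else some top

-- ===== PRECONDITION & SPEC =====
def Spec_pick_latest_fixed_version_py (versions : List (List (String × String))) (out : Option String) : Prop := out = pick_latest_fixed_version_py_alt versions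
instance (versions : List (List (String × String))) (out : Option String) : Decidable (Spec_pick_latest_fixed_version_py versions out) := by unfold Spec_pick_latest_fixed_version_py; infer_instance

-- ===== CLAIM (what is proved, stated in full; the proofs are below) =====
def Claim_equal_pick_latest_fixed_version_py : Prop := ∀ (versions : List (List (String × String))), Dom_pick_latest_fixed_version_py versions → Spec_pick_latest_fixed_version_py versions (pick_latest_fixed_version_py versions)

-- ===== LEMMAS AND PROOFS =====

theorem pvEmpty_le (s : String) : "" ≤ s := by
  refine String.le_iff_toList_le.mpr ?_
  show ([] : List Char) ≤ s.toList
  cases s.toList with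
  | nil => exact le_refl _
  | cons a t => exact le_of_lt (List.nil_lt_cons a t)

-- dropping "" elements does not change a running max
theorem pvFoldl_max_filter : ∀ (l : List String) (b : String),
    (l.filter (fun s => s ≠ "")).foldl max b = l.foldl max b := by
  intro l
  induction l with
  | nil => intro b; rfl
  | cons x t ih =>
    intro b
    rw [List.filter_cons]
    by_cases hx : x = ""
    · rw [if_neg (by simp [hx]), ih, List.foldl_cons, hx,
        max_eq_left (pvEmpty_le b)]
    · rw [if_pos (by simp [hx]), List.foldl_cons, List.foldl_cons, ih]

-- last element of a ≤-sorted nonempty list is its max over ""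
theorem pvLast_of_pairwise : ∀ (l : List String), l ≠ [] →
    l.Pairwise (· ≤ ·) → l.getLast? = some (l.foldl max "") := by
  intro l
  induction l with
  | nil => intro h; exact absurd rfl h
  | cons x t ih =>
    intro _ hp
    cases t with
    | nil =>
      simp [List.foldl, max_eq_right (pvEmpty_le x)]
    | cons y u =>
      have hp' := List.Pairwise.sublist (List.sublist_cons_self x (y :: u)) hp
      have hxy : x ≤ y := (List.pairwise_cons.mp hp).1 y (by simp)
      have := ih (by simp) hp'
      simp only [List.getLast?_cons_cons] at this ⊢
      rw [this]
      simp only [List.foldl]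
      rw [max_eq_right (pvEmpty_le x), max_eq_right hxy, max_eq_right (pvEmpty_le y)]

theorem pvSorted_last (l : List String) (h : l ≠ []) :
    (PySem.List.sorted l (fun x => x) false).getLast? = some (l.foldl max "") := by
  have hperm := PySem.List.sorted_perm l (fun x => x) false
  have hne : PySem.List.sorted l (fun x => x) false ≠ [] := by
    intro hnil
    exact h (List.Perm.eq_nil (hnil ▸ hperm).symm)
  have hpw : (PySem.List.sorted l (fun x => x) false).Pairwise (· ≤ ·) := by
    simpa using PySem.List.sorted_pairwise l (fun x => x)
  have hfold : (PySem.List.sorted l (fun x => x) false).foldl max "" = l.foldl max "" :=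
    (List.Perm.foldl_op_eq hperm.symm).symm
  rw [pvLast_of_pairwise _ hne hpw, hfold]

-- A's comprehension equals filtering the ""-padded value list
theorem pvF_eq (versions : List (List (String × String))) :
    (versions.filter pvAguard).map pvAval
      = (versions.map pvAval).filter (fun s => s ≠ "") := by
  rw [List.filter_map]
  congr 1
  apply List.filter_congr
  intro v _
  show pvAguard v = ((fun s => decide (s ≠ "")) ∘ pvAval) v
  unfold pvAguard pvAval Function.comp
  cases h : (PySem.Dict.mk v).get? "fixed_version" with
  | none => simp [h]
  | some s => simp [h]

-- the core equality, stated over the padded value list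
theorem pvMain (L : List String) :
    (if (L.filter (fun s => s ≠ "")).isEmpty then none
     else PySem.List.max? (L.filter (fun s => s ≠ "")) (fun x => x))
    = (if (if (PySem.List.sorted L (fun x => x) false).isEmpty then ""
           else (PySem.List.pyGet? (PySem.List.sorted L (fun x => x) false) (-1)).getD "") = ""
       then none
       else some (if (PySem.List.sorted L (fun x => x) false).isEmpty then ""
                  else (PySem.List.pyGet? (PySem.List.sorted L (fun x => x) false) (-1)).getD "")) := by
  cases hL : L with
  | nil => rfl
  | cons a l =>
    have hLne : (a :: l) ≠ [] := by simp
    have hSlast := pvSorted_last (a :: l) hLne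
    have hSneL : PySem.List.sorted (a :: l) (fun x => x) false ≠ [] := by
      intro hnil; rw [hnil] at hSlast; simp at hSlast
    have hSne : (PySem.List.sorted (a :: l) (fun x => x) false).isEmpty = false := by
      simpa [List.isEmpty_iff] using hSneL
    have hget : (PySem.List.pyGet? (PySem.List.sorted (a :: l) (fun x => x) false) (-1)).getD ""
        = (a :: l).foldl max "" := by
      rw [PySem.List.pyGet?_neg_one, hSlast]; rfl
    rw [hSne]
    simp only [Bool.false_eq_true, if_false, hget]
    cases hF : (a :: l).filter (fun s => s ≠ "") with
    | nil =>
      have hmax : (a :: l).foldl max "" = "" := by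
        have := pvFoldl_max_filter (a :: l) ""
        rw [hF] at this
        exact this.symm
      simp [hmax]
    | cons x t =>
      have hxne : x ≠ "" := by
        have hxmem : x ∈ (a :: l).filter (fun s => s ≠ "") := by rw [hF]; simp
        simpa using List.of_mem_filter hxmem
      have hmaxF : (a :: l).foldl max "" = t.foldl max x := by
        have h1 := pvFoldl_max_filter (a :: l) ""
        rw [hF] at h1
        rw [← h1, List.foldl_cons, max_eq_right (pvEmpty_le x)]
      have hMne : (a :: l).foldl max "" ≠ "" := by
        rw [hmaxF]
        intro hcon
        have hle : x ≤ t.foldl max x := (PySem.List.le_foldl_max t x).1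
        rw [hcon] at hle
        exact hxne (le_antisymm hle (pvEmpty_le x))
      rw [hmaxF] at hMne
      simp [PySem.List.max?_id_cons, hMne, hmaxF]

-- ===== VERDICT (by name: the statement is the Claim_ definition above) =====
theorem pick_latest_fixed_version_py_spec : Claim_equal_pick_latest_fixed_version_py := by
  intro versions _
  unfold Spec_pick_latest_fixed_version_py pick_latest_fixed_version_py pick_latest_fixed_version_py_alt
  have hval : pvBval = pvAval := rfl
  simp only [hval]
  rw [pvF_eq]
  exact pvMain (versions.map pvAval)
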